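-- pv_equiv track=rewrite | github.com/zack-klein/algos | find_peak_element.py | evaluate_peak
-- ===== SOURCE A (Python) =====
-- def evaluate_peak(i, nums):
--
--     if i == 0 or i == (len(nums) - 1):
--         return i
--
--     elif nums[i] < nums[i - 1]:
--         return evaluate_peak(i - 1, nums)
--
--     elif nums[i] < nums[i + 1]:
--         return evaluate_peak(i + 1, nums)
--
--     else:
--         return i
-- ===== SOURCE B (Python) =====
-- def evaluate_peak(i, nums):
--     last = len(nums) - 1
--     if i == 0 or i == last:
--         return i
--     while i > 0 and nums[i] < nums[i - 1]:
--         i -= 1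
--     while i < last and nums[i] < nums[i + 1]:
--         i += 1
--     return i
-- ===== Notes on version B (the rewrite author's own statement) =====
-- stated objective: alternative
-- what changed: A's tail recursion (one self-call per step, re-testing the full branch cascade at every index) is replaced by two directional while-loops after the boundary check: scan left to the top of the strict descent run, then scan right to the top of the strict ascent run; B never moves in both directions and uses no recursion.
-- outside the precondition, e.g. on evaluate_peak(-1, [1, 3, 2]): A returns -2, B returns -1; on evaluate_peak(-2, [3, 2, 1]): A raises IndexError, B returns -2
import Mathlib
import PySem

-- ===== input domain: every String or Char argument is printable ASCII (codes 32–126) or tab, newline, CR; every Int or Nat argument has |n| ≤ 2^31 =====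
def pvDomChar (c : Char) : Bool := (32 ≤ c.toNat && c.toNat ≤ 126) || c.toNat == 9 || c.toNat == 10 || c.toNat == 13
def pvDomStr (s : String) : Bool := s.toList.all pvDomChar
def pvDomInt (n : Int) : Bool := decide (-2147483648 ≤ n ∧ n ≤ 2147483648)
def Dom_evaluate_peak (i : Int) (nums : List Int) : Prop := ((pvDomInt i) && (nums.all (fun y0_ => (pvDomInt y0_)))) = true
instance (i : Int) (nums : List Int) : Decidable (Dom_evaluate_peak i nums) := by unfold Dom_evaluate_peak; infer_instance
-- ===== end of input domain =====

-- B replaces A's tail recursion by two directional scan loops (walk left to the top of the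
-- descent run, else walk right to the top of the ascent run); equivalence is about the
-- return value on valid start indices 0 ≤ i < len(nums).

-- shared indexing helper: nums[j] with Python semantics (inside Pre_ every access is in range,
-- so the .getD 0 default is never taken on admitted inputs)
def pg (nums : List Int) (j : Int) : Int := (PySem.List.pyGet? nums j).getD 0

-- ===== PORT A =====
-- A's recursion, made total with a fuel counter (nums.length + 1 always suffices on Pre_,
-- proved below); branches in A's order.
def evalPeakFuel (fuel : Nat) (i : Int) (nums : List Int) : Int :=
  match fuel with
  | 0 => i
  | f + 1 =>
    if i = 0 ∨ i = (nums.length : Int) - 1 then i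
    else if pg nums i < pg nums (i - 1) then evalPeakFuel f (i - 1) nums
    else if pg nums i < pg nums (i + 1) then evalPeakFuel f (i + 1) nums
    else i

def evaluate_peak (i : Int) (nums : List Int) : Int :=
  evalPeakFuel (nums.length + 1) i nums

-- ===== PORT B =====
-- first while loop of Source B: walk left while nums[i] < nums[i-1]
def goLeft (fuel : Nat) (i : Int) (nums : List Int) : Int :=
  match fuel with
  | 0 => i
  | f + 1 => if 0 < i ∧ pg nums i < pg nums (i - 1) then goLeft f (i - 1) nums else i

-- second while loop of Source B: walk right while nums[i] < nums[i+1]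
def goRight (fuel : Nat) (i : Int) (nums : List Int) : Int :=
  match fuel with
  | 0 => i
  | f + 1 => if i < (nums.length : Int) - 1 ∧ pg nums i < pg nums (i + 1) then goRight f (i + 1) nums else i

def evaluate_peak_alt (i : Int) (nums : List Int) : Int :=
  if i = 0 ∨ i = (nums.length : Int) - 1 then i
  else goRight (nums.length + 1) (goLeft (nums.length + 1) i nums) nums

-- ===== PRECONDITION & SPEC =====
-- Pre_ admits valid start indices 0 ≤ i < len(nums), plus i = 0 and i = len(nums) - 1
-- themselves (A returns i there unconditionally, even on an empty list). It excludes other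
-- start indices outside [0, len(nums)): there A either raises IndexError or returns a value
-- reached through Python's negative-index wraparound, an artefact of the implementation
-- rather than intended behaviour of a peak search started at a valid index.
def Pre_evaluate_peak (i : Int) (nums : List Int) : Prop :=
  (0 ≤ i ∧ i < (nums.length : Int)) ∨ i = 0 ∨ i = (nums.length : Int) - 1
instance (i : Int) (nums : List Int) : Decidable (Pre_evaluate_peak i nums) := by
  unfold Pre_evaluate_peak; infer_instance

def pvWitness_evaluate_peak : Int × List Int := (1, [1, 3, 2])

def Spec_evaluate_peak (i : Int) (nums : List Int) (out : Int) : Prop := out = evaluate_peak_alt i nums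
instance (i : Int) (nums : List Int) (out : Int) : Decidable (Spec_evaluate_peak i nums out) := by unfold Spec_evaluate_peak; infer_instance

-- ===== CLAIM (what is proved, stated in full; the proofs are below) =====
def Claim_equal_evaluate_peak : Prop := ∀ (i : Int) (nums : List Int), Dom_evaluate_peak i nums → Pre_evaluate_peak i nums → Spec_evaluate_peak i nums (evaluate_peak i nums)

-- ===== LEMMAS AND PROOFS =====

-- Left phase: if the value to the right of i is smaller (the invariant after each left step),
-- A's recursion and B's left loop take the same steps, and the stopping index still carries
-- the invariant, so B's right loop will not move afterwards.
lemma both_left : ∀ (f : Nat) (i : Int) (nums : List Int),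
    i.toNat < f → 0 ≤ i → i < (nums.length : Int) - 1 → pg nums (i + 1) < pg nums i →
    evalPeakFuel f i nums = goLeft f i nums ∧
    0 ≤ goLeft f i nums ∧ goLeft f i nums < (nums.length : Int) - 1 ∧
    pg nums (goLeft f i nums + 1) < pg nums (goLeft f i nums) := by
  intro f
  induction f with
  | zero => intro i nums h; omega
  | succ f ih =>
    intro i nums hf h0 hlt hinv
    by_cases hi0 : i = 0
    · subst hi0
      have hA : evalPeakFuel (f + 1) 0 nums = 0 := by simp [evalPeakFuel]
      have hB : goLeft (f + 1) 0 nums = 0 := by simp [goLeft]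
      rw [hA, hB]
      exact ⟨rfl, le_refl _, hlt, hinv⟩
    · by_cases hstep : pg nums i < pg nums (i - 1)
      · have hA : evalPeakFuel (f + 1) i nums = evalPeakFuel f (i - 1) nums := by
          simp only [evalPeakFuel]
          rw [if_neg (by omega), if_pos hstep]
        have hB : goLeft (f + 1) i nums = goLeft f (i - 1) nums := by
          simp only [goLeft]
          rw [if_pos ⟨by omega, hstep⟩]
        rw [hA, hB]
        exact ih (i - 1) nums (by omega) (by omega) (by omega) (by simpa using hstep)
      · have hA : evalPeakFuel (f + 1) i nums = i := by
          simp only [evalPeakFuel]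
          rw [if_neg (by omega), if_neg hstep, if_neg (by omega)]
        have hB : goLeft (f + 1) i nums = i := by
          simp only [goLeft]
          rw [if_neg (by intro hc; exact hstep hc.2)]
        rw [hA, hB]
        exact ⟨rfl, h0, hlt, hinv⟩

-- Right phase: if the value to the left of i is smaller, A's recursion and B's right loop agree.
lemma both_right : ∀ (f : Nat) (i : Int) (nums : List Int),
    ((nums.length : Int) - 1 - i).toNat < f → 0 < i → i ≤ (nums.length : Int) - 1 →
    pg nums (i - 1) < pg nums i →
    evalPeakFuel f i nums = goRight f i nums := by
  intro f
  induction f with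
  | zero => intro i nums h; omega
  | succ f ih =>
    intro i nums hf h0 hle hinv
    by_cases hend : i = (nums.length : Int) - 1
    · simp only [evalPeakFuel, goRight]
      rw [if_pos (Or.inr hend), if_neg (by omega)]
    · by_cases hstep : pg nums i < pg nums (i + 1)
      · have hA : evalPeakFuel (f + 1) i nums = evalPeakFuel f (i + 1) nums := by
          simp only [evalPeakFuel]
          rw [if_neg (by omega), if_neg (by omega), if_pos hstep]
        have hB : goRight (f + 1) i nums = goRight f (i + 1) nums := by
          simp only [goRight]
          rw [if_pos ⟨by omega, hstep⟩]
        rw [hA, hB]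
        exact ih (i + 1) nums (by omega) (by omega) (by omega) (by simpa using hstep)
      · simp only [evalPeakFuel, goRight]
        rw [if_neg (by omega), if_neg (by omega), if_neg hstep,
            if_neg (by intro hc; exact hstep hc.2)]

-- ===== VERDICT (by name: the statement is the Claim_ definition above) =====
theorem evaluate_peak_spec : Claim_equal_evaluate_peak := by
  intro i nums _hdom hpre
  unfold Spec_evaluate_peak evaluate_peak evaluate_peak_alt
  by_cases hedge : i = 0 ∨ i = (nums.length : Int) - 1
  · rw [if_pos hedge]
    simp only [evalPeakFuel]
    rw [if_pos hedge]
  · obtain ⟨h0, hn⟩ : 0 ≤ i ∧ i < (nums.length : Int) := by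
      rcases hpre with h | h | h
      · exact h
      · exact absurd (Or.inl h) hedge
      · exact absurd (Or.inr h) hedge
    have hmid : 0 < i ∧ i < (nums.length : Int) - 1 := by omega
    rw [if_neg hedge]
    by_cases hL : pg nums i < pg nums (i - 1)
    · have hA : evalPeakFuel (nums.length + 1) i nums = evalPeakFuel nums.length (i - 1) nums := by
        simp only [evalPeakFuel]
        rw [if_neg hedge, if_pos hL]
      have hB : goLeft (nums.length + 1) i nums = goLeft nums.length (i - 1) nums := by
        simp only [goLeft]
        rw [if_pos ⟨hmid.1, hL⟩]
      obtain ⟨heq, hj0, hjlt, hjinv⟩ :=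
        both_left nums.length (i - 1) nums (by omega) (by omega) (by omega) (by simpa using hL)
      rw [hA, hB, heq]
      simp only [goRight]
      rw [if_neg (by intro hc; omega)]
    · have hBL : goLeft (nums.length + 1) i nums = i := by
        simp only [goLeft]
        rw [if_neg (by intro hc; exact hL hc.2)]
      rw [hBL]
      by_cases hR : pg nums i < pg nums (i + 1)
      · have hA : evalPeakFuel (nums.length + 1) i nums = evalPeakFuel nums.length (i + 1) nums := by
          simp only [evalPeakFuel]
          rw [if_neg hedge, if_neg hL, if_pos hR]
        have hB : goRight (nums.length + 1) i nums = goRight nums.length (i + 1) nums := by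
          simp only [goRight]
          rw [if_pos ⟨hmid.2, hR⟩]
        rw [hA, hB]
        exact both_right nums.length (i + 1) nums (by omega) (by omega) (by omega) (by simpa using hR)
      · simp only [evalPeakFuel, goRight]
        rw [if_neg hedge, if_neg hL, if_neg hR, if_neg (by intro hc; exact hR hc.2)]
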